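-- pv_equiv track=rewrite | github.com/Onely7/local_data_studio | server/db.py | split_row_ids
-- ===== SOURCE A (Python) =====
-- from typing import Any
--
-- def split_row_ids(columns: list[str], rows: list[tuple[Any, ...]]) -> tuple[list[str], list[list[Any]], list[int]]:
--     """Split __rowid out of the row tuples for API responses."""
--     if "__rowid" not in columns:
--         return columns, [list(row) for row in rows], []
--     idx = columns.index("__rowid")
--     row_ids: list[int] = []
--     cleaned_rows: list[list[Any]] = []
--     for row in rows:
--         row_ids.append(int(row[idx]))
--         cleaned_rows.append(list(row[:idx]) + list(row[idx + 1 :]))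
--     cleaned_columns = columns[:idx] + columns[idx + 1 :]
--     return cleaned_columns, cleaned_rows, row_ids
-- ===== SOURCE B (Python) =====
-- def _extract(seq, idx):
--     """Recursively split seq into (seq[idx], the other elements in order)."""
--     if idx == 0:
--         return seq[0], list(seq[1:])
--     v, rest = _extract(seq[1:], idx - 1)
--     return v, [seq[0]] + rest
--
--
-- def split_row_ids(columns: list, rows: list) -> tuple:
--     """Split __rowid out of the row tuples for API responses."""
--     if "__rowid" not in columns:
--         return columns, [list(row) for row in rows], []
--     idx = columns.index("__rowid")
--     pairs = [_extract(row, idx) for row in rows]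
--     _, cleaned_columns = _extract(columns, idx)
--     return cleaned_columns, [rest for _, rest in pairs], [int(v) for v, _ in pairs]
-- ===== Notes on version B (the rewrite author's own statement) =====
-- stated objective: alternative
-- what changed: Replaces A's index-lookup-plus-slice-and-concatenate accumulator loop by a recursive extractor that walks each sequence once and returns the (value at idx, remaining elements) pair simultaneously, applied uniformly to the header and to every row.
import Mathlib
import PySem

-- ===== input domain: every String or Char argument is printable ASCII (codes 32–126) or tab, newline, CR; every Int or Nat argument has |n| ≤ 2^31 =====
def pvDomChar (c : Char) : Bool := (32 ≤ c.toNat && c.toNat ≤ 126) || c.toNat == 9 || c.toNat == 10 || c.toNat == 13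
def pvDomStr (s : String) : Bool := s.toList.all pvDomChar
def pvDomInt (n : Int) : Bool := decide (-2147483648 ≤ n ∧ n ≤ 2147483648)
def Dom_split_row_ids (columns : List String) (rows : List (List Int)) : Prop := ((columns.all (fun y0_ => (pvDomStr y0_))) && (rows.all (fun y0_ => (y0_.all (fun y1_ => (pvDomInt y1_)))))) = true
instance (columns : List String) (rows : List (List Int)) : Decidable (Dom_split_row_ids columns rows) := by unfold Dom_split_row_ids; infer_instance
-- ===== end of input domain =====

-- B replaces A's index-lookup-plus-slice-and-concatenate loop by a recursive extractor that
-- walks each sequence once, returning (value at idx, remaining elements) together; objective: alternative.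


-- ===== PORT A =====
def split_row_ids (columns : List String) (rows : List (List Int)) : List String × List (List Int) × List Int :=
  if "__rowid" ∉ columns then
    (columns, rows.map (fun row => row), [])
  else
    let idx : Int := ((PySem.List.index? columns "__rowid").getD 0 : Nat)
    -- for row in rows: row_ids.append(int(row[idx])); cleaned_rows.append(list(row[:idx]) + list(row[idx+1:]))
    -- (row[idx] raises IndexError on a too-short row; Pre_ excludes that, the port defaults to 0 there)
    let st := rows.foldl
      (fun (acc : List Int × List (List Int)) row =>
        (acc.1 ++ [(PySem.List.pyGet? row idx).getD 0],
         acc.2 ++ [PySem.List.slice row none (some idx) ++ PySem.List.slice row (some (idx + 1)) none]))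
      ([], [])
    let cleaned_columns := PySem.List.slice columns none (some idx) ++ PySem.List.slice columns (some (idx + 1)) none
    (cleaned_columns, st.2, st.1)

-- ===== PORT B =====
-- _extract(seq, idx): recursively split seq into (seq[idx], the other elements in order);
-- none = the IndexError Python's seq[0] raises when the recursion exhausts seq (Pre_ excludes it).
def pvExtract {α : Type} : List α → Nat → Option (α × List α)
  | [], _ => none
  | x :: xs, 0 => some (x, xs)
  | x :: xs, n + 1 => (pvExtract xs n).map (fun p => (p.1, x :: p.2))

def split_row_ids_alt (columns : List String) (rows : List (List Int)) : List String × List (List Int) × List Int :=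
  if "__rowid" ∉ columns then
    (columns, rows.map (fun row => row), [])
  else
    let idx := (PySem.List.index? columns "__rowid").getD 0
    let pairs := rows.map (fun row => (pvExtract row idx).getD (0, []))
    let cleaned_columns := ((pvExtract columns idx).getD ("", [])).2
    (cleaned_columns, pairs.map (fun p => p.2), pairs.map (fun p => p.1))

-- ===== PRECONDITION & SPEC =====
-- Pre_ excludes exactly the inputs where both Pythons raise IndexError: "__rowid" present in
-- columns while some row is too short to have an element at its index.
def Pre_split_row_ids (columns : List String) (rows : List (List Int)) : Prop :=
  "__rowid" ∈ columns → ∀ row ∈ rows, columns.idxOf "__rowid" < row.length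
instance (columns : List String) (rows : List (List Int)) : Decidable (Pre_split_row_ids columns rows) := by unfold Pre_split_row_ids; infer_instance
def pvWitness_split_row_ids : List String × List (List Int) := (["a", "__rowid", "b"], [[5, 7, 9], [1, 2, 3]])
def Spec_split_row_ids (columns : List String) (rows : List (List Int)) (out : List String × List (List Int) × List Int) : Prop := out = split_row_ids_alt columns rows
instance (columns : List String) (rows : List (List Int)) (out : List String × List (List Int) × List Int) : Decidable (Spec_split_row_ids columns rows out) := by unfold Spec_split_row_ids; infer_instance

-- ===== CLAIM (what is proved, stated in full; the proofs are below) =====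
def Claim_equal_split_row_ids : Prop := ∀ (columns : List String) (rows : List (List Int)), Dom_split_row_ids columns rows → Pre_split_row_ids columns rows → Spec_split_row_ids columns rows (split_row_ids columns rows)

-- ===== LEMMAS AND PROOFS =====

-- the recursive extractor, in range, returns the element and take/append/drop
theorem pvExtract_eq {α : Type} (seq : List α) (idx : Nat) (h : idx < seq.length) :
    pvExtract seq idx = some (seq[idx], seq.take idx ++ seq.drop (idx + 1)) := by
  induction seq generalizing idx with
  | nil => simp at h
  | cons x xs ih =>
      cases idx with
      | zero => simp [pvExtract]
      | succ n =>
          have hn : n < xs.length := by simpa using h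
          simp [pvExtract, ih n hn]

-- the paired-append fold equals a pair of maps
theorem pvFold_pair {α β γ : Type} (l : List α) (f : α → β) (g : α → γ)
    (a : List β) (b : List γ) :
    l.foldl (fun (acc : List β × List γ) x => (acc.1 ++ [f x], acc.2 ++ [g x])) (a, b)
      = (a ++ l.map f, b ++ l.map g) := by
  induction l generalizing a b with
  | nil => simp
  | cons x xs ih => simp [List.foldl_cons, ih]

-- ===== VERDICT (by name: the statement is the Claim_ definition above) =====
theorem split_row_ids_spec : Claim_equal_split_row_ids := by
  intro columns rows _ hpre
  unfold Spec_split_row_ids split_row_ids split_row_ids_alt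
  by_cases hmem : "__rowid" ∈ columns
  · cases hidx : PySem.List.index? columns "__rowid" with
    | none => exact absurd ((PySem.List.index?_eq_none_iff columns "__rowid").mp hidx) (by simpa using hmem)
    | some k =>
        obtain ⟨hkc, hcol, hprev⟩ := PySem.List.getElem_of_index?_eq_some hidx
        have h2 : columns.idxOf? "__rowid" = some k := by
          rw [← PySem.List.index?_eq_idxOf?]; exact hidx
        have hkidx : columns.idxOf "__rowid" = k := by
          rw [List.idxOf_eq_getD_idxOf?, h2]; rfl
        have hrow : ∀ row ∈ rows, k < row.length := by
          intro row hr; have := hpre hmem row hr; omega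
        have hslice : ∀ (β : Type) (xs : List β),
            PySem.List.slice xs none (some (k : Int)) ++ PySem.List.slice xs (some ((k : Int) + 1)) none
              = xs.take k ++ xs.drop (k + 1) := by
          intro β xs
          rw [PySem.List.slice_to_natCast,
            (by push_cast; ring : ((k : Int) + 1) = ((k + 1 : Nat) : Int)),
            PySem.List.slice_from_natCast]
        simp only [hmem, not_true_eq_false, if_neg, not_false_eq_true, Option.getD_some]
        rw [pvFold_pair]
        simp only [List.nil_append, List.map_map, Prod.mk.injEq]
        refine ⟨?_, ?_, ?_⟩
        · rw [hslice, pvExtract_eq columns k hkc]; rfl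
        · exact List.map_congr_left (fun row hr => by
            simp only [hslice, Function.comp_apply, pvExtract_eq row k (hrow row hr),
              Option.getD_some])
        · exact List.map_congr_left (fun row hr => by
            have hkr := hrow row hr
            simp only [Function.comp_apply, pvExtract_eq row k hkr, Option.getD_some,
              PySem.List.pyGet?_natCast, List.getElem?_eq_getElem hkr])
  · simp [hmem]
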